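-- pv_equiv track=rewrite | github.com/hhuongnt/Sprite-Sheet | spriteutil.py | check_neighborhood
-- ===== SOURCE A (Python) =====
-- def check_neighborhood(pixel_coordinate, labelled_dict):
--     """
--     Check nearest neighbors and return a list of equivalence for that pixel.
--     @params:
--     1. pixel_coordinate: coordinate of the pixel.
--     2. labelled_dict: dict containing label of each image pixels {label: [pixels]}.
--
--     @return:
--     1. a set of pixel's equivalence.
--     """
--     # check neighborhood to find exist label
--     equivalence = set()
--     directions = [(-1,-1), (0,-1), (1,-1), (-1,0), (1,0), (-1,1), (0,1), (1,1)]
--     for direction in directions: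
--         neighbor = tuple(map(lambda x,y: x+y, pixel_coordinate, direction))
--         for label,list_pixels in labelled_dict.items():
--
--             # if neighbor has a label
--             if neighbor in list_pixels:
--                 equivalence.add(label)
--     return equivalence
-- ===== SOURCE B (Python) =====
-- def check_neighborhood(pixel_coordinate, labelled_dict):
--     """
--     Check nearest neighbors and return a set of equivalence for that pixel.
--     Builds a reverse index pixel -> labels once, lists the labels hit over the
--     8 explicit neighbor coordinates, and returns them as a set.
--     """
--     x, y = pixel_coordinate
--     neighbors = [(x-1, y-1), (x, y-1), (x+1, y-1), (x-1, y),
--                  (x+1, y), (x-1, y+1), (x, y+1), (x+1, y+1)]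
--     index = {}
--     for label, list_pixels in labelled_dict.items():
--         for pix in list_pixels:
--             index.setdefault(pix, []).append(label)
--     return set(label for nb in neighbors for label in index.get(nb, []))
-- ===== Notes on version B (the rewrite author's own statement) =====
-- stated objective: alternative
-- what changed: Replaces the per-direction scan over every label's pixel list with a reverse index (pixel -> labels) built in one pass over the dict, followed by 8 direct lookups collected by a comprehension into the set.
import Mathlib
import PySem

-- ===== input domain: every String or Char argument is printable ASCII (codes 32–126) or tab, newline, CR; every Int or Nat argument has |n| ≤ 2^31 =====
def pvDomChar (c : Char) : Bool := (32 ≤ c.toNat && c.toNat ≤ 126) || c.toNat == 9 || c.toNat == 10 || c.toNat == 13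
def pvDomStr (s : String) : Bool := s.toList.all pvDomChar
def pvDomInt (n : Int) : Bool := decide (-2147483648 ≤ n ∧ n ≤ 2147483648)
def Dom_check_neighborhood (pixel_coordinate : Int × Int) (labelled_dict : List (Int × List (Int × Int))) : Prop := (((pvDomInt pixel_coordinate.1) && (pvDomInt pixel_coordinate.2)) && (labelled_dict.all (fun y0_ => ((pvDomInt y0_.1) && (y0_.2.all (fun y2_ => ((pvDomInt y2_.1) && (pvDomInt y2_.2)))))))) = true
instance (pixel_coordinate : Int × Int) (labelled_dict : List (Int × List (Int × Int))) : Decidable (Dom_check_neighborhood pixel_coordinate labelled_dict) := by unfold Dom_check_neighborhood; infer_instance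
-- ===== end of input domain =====

-- B builds a reverse index pixel -> labels in one pass and collects the labels found at the 8 explicit neighbor coordinates into the set, instead of scanning every label list once per direction (alternative algorithm, same measured cost).

-- ===== PORT A =====
def check_neighborhood (pixel_coordinate : Int × Int) (labelled_dict : List (Int × List (Int × Int))) : List Int :=
  let directions : List (Int × Int) := [(-1,-1), (0,-1), (1,-1), (-1,0), (1,0), (-1,1), (0,1), (1,1)]
  directions.foldl (fun equivalence direction =>
    let neighbor : Int × Int := (pixel_coordinate.1 + direction.1, pixel_coordinate.2 + direction.2)
    labelled_dict.foldl (fun equivalence e =>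
      if neighbor ∈ e.2 then PySem.Set.add equivalence e.1 else equivalence) equivalence)
    PySem.Set.empty

-- ===== PORT B =====
def check_neighborhood_alt (pixel_coordinate : Int × Int) (labelled_dict : List (Int × List (Int × Int))) : List Int :=
  let x := pixel_coordinate.1
  let y := pixel_coordinate.2
  let neighbors : List (Int × Int) := [(x-1, y-1), (x, y-1), (x+1, y-1), (x-1, y),
                                       (x+1, y), (x-1, y+1), (x, y+1), (x+1, y+1)]
  let index : PySem.Dict (Int × Int) (List Int) :=
    labelled_dict.foldl (fun d e =>
      e.2.foldl (fun d pix => d.modify pix [] (· ++ [e.1])) d) PySem.Dict.empty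
  PySem.Set.ofList (neighbors.flatMap (fun nb => index.getD nb []))

-- ===== PRECONDITION & SPEC =====
def Spec_check_neighborhood (pixel_coordinate : Int × Int) (labelled_dict : List (Int × List (Int × Int))) (out : List Int) : Prop := out = check_neighborhood_alt pixel_coordinate labelled_dict
instance (pixel_coordinate : Int × Int) (labelled_dict : List (Int × List (Int × Int))) (out : List Int) : Decidable (Spec_check_neighborhood pixel_coordinate labelled_dict out) := by unfold Spec_check_neighborhood; infer_instance

-- ===== CLAIM (what is proved, stated in full; the proofs are below) =====
def Claim_equal_check_neighborhood : Prop := ∀ (pixel_coordinate : Int × Int) (labelled_dict : List (Int × List (Int × Int))), Dom_check_neighborhood pixel_coordinate labelled_dict → Spec_check_neighborhood pixel_coordinate labelled_dict (check_neighborhood pixel_coordinate labelled_dict)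

-- ===== LEMMAS AND PROOFS =====

-- folding over a flatMap is the nested fold
theorem pv_foldl_flatMap {α β γ : Type} (l : List α) (g : α → List β) (f : γ → β → γ) (init : γ) :
    (l.flatMap g).foldl f init = l.foldl (fun acc a => (g a).foldl f acc) init := by
  induction l generalizing init with
  | nil => rfl
  | cons x xs ih => simp [List.flatMap_cons, List.foldl_append, ih]

-- adding an element twice is adding once
theorem pv_add_add {α : Type} [BEq α] [LawfulBEq α] (s : PySem.Set α) (x : α) :
    PySem.Set.add (PySem.Set.add s x) x = PySem.Set.add s x := by
  simp [PySem.Set.add, PySem.Set.contains]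
  split <;> simp_all

-- folding Set.add over a constant nonempty list is one add
theorem pv_foldl_add_const {α : Type} [BEq α] [LawfulBEq α] (l : List α) (x : α)
    (hall : ∀ y ∈ l, y = x) (hne : l ≠ []) (acc : PySem.Set α) :
    l.foldl PySem.Set.add acc = PySem.Set.add acc x := by
  induction l generalizing acc with
  | nil => exact absurd rfl hne
  | cons y ys ih =>
    have hy : y = x := hall y (by simp)
    subst hy
    by_cases h : ys = []
    · subst h; rfl
    · simp only [List.foldl_cons]
      rw [ih (fun z hz => hall z (by simp [hz])) h, pv_add_add]

-- the reverse-index bucket at p, as built by B's nested loop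
theorem pv_index_getD (labelled_dict : List (Int × List (Int × Int))) (p : Int × Int) :
    (labelled_dict.foldl (fun d e =>
        e.2.foldl (fun d pix => d.modify pix [] (· ++ [e.1])) d) PySem.Dict.empty).getD p []
    = labelled_dict.flatMap (fun e => (e.2.filter (· == p)).map (fun _ => e.1)) := by
  have h1 : labelled_dict.foldl (fun d e =>
        e.2.foldl (fun d pix => d.modify pix [] (· ++ [e.1])) d) PySem.Dict.empty
      = (labelled_dict.flatMap (fun e => e.2.map (fun q => (q, e.1)))).foldl
          (fun d pr => d.modify pr.1 [] (· ++ [pr.2])) PySem.Dict.empty := by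
    rw [pv_foldl_flatMap]
    apply PySem.List.foldl_congr_mem
    intro d e _
    rw [List.foldl_map]
  rw [h1, PySem.Dict.getD_foldl_modify_append]
  simp [PySem.Dict.getD_empty, List.filter_flatMap, List.filter_map, List.map_flatMap,
    List.map_map, Function.comp_def]

-- A's inner scan over the dict equals folding Set.add over B's bucket
theorem pv_inner (labelled_dict : List (Int × List (Int × Int))) (p : Int × Int)
    (acc : PySem.Set Int) :
    labelled_dict.foldl (fun equivalence e =>
        if p ∈ e.2 then PySem.Set.add equivalence e.1 else equivalence) acc
    = (labelled_dict.flatMap (fun e => (e.2.filter (· == p)).map (fun _ => e.1))).foldl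
        PySem.Set.add acc := by
  rw [pv_foldl_flatMap]
  induction labelled_dict generalizing acc with
  | nil => rfl
  | cons e es ih =>
    simp only [List.foldl_cons]
    rw [ih]
    congr 1
    by_cases h : p ∈ e.2
    · rw [if_pos h]
      refine (pv_foldl_add_const _ _ ?_ ?_ _).symm
      · intro y hy; simp at hy; exact hy.2
      · simp only [ne_eq, List.map_eq_nil_iff, List.filter_eq_nil_iff]
        push Not
        exact ⟨p, h, by simp⟩
    · rw [if_neg h]
      have : e.2.filter (· == p) = [] := by
        simp only [List.filter_eq_nil_iff]
        intro q hq hqp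
        exact h (by simpa using (beq_iff_eq.mp hqp ▸ hq))
      simp [this]

-- B's neighbor list is A's direction offsets applied to the pixel
theorem pv_neighbors_eq (x y : Int) :
    ([(x-1, y-1), (x, y-1), (x+1, y-1), (x-1, y), (x+1, y), (x-1, y+1), (x, y+1), (x+1, y+1)] : List (Int × Int))
    = ([(-1,-1), (0,-1), (1,-1), (-1,0), (1,0), (-1,1), (0,1), (1,1)] : List (Int × Int)).map
        (fun d => (x + d.1, y + d.2)) := by
  simp [sub_eq_add_neg]

-- ===== VERDICT (by name: the statement is the Claim_ definition above) =====
theorem check_neighborhood_spec : Claim_equal_check_neighborhood := by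
  intro pc ld _
  unfold Spec_check_neighborhood check_neighborhood check_neighborhood_alt
  simp only []
  rw [pv_neighbors_eq, PySem.Set.ofList_eq_foldl, pv_foldl_flatMap, List.foldl_map]
  apply PySem.List.foldl_congr_mem
  intro acc dir _
  rw [pv_inner, pv_index_getD]
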